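-- pv_equiv track=rewrite | github.com/sagami121/Sagami-Youtube-Downloader | main.py | extract_latest_changelog_entry
-- ===== SOURCE A (Python) =====
-- def extract_latest_changelog_entry(changelog_text: str) -> str:
--     lines = (changelog_text or "").splitlines()
--     block = []
--     started = False
--     for line in lines:
--         if line.strip():
--             started = True
--             block.append(line.rstrip())
--         elif started:
--             break
--     return "\n".join(block).strip()
-- ===== SOURCE B (Python) =====
-- from itertools import groupby
--
--
-- def extract_latest_changelog_entry(changelog_text: str) -> str:
--     lines = (changelog_text or "").splitlines()
--     for nonblank, run in groupby(lines, key=lambda l: bool(l.strip())):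
--         if nonblank:
--             return "\n".join(l.rstrip() for l in run).strip()
--     return ""
-- ===== Notes on version B (the rewrite author's own statement) =====
-- stated objective: alternative
-- what changed: Instead of a stateful flag/break loop, B partitions the lines into maximal consecutive runs keyed by blankness with itertools.groupby and returns the formatting of the first non-blank run.
import Mathlib
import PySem

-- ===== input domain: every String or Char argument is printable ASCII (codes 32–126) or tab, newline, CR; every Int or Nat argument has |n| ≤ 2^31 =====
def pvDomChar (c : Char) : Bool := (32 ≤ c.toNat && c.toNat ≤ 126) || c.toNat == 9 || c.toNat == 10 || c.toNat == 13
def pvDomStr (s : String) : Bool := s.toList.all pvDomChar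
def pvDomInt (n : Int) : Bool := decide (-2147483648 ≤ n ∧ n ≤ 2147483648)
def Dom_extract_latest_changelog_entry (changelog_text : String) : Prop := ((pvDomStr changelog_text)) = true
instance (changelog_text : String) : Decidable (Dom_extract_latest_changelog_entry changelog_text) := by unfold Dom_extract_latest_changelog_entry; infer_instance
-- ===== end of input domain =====

-- B groups the lines into maximal consecutive runs keyed by blankness (itertools.groupby) and
-- formats the first non-blank run, instead of A's flag-and-break loop (alternative; same cost).

-- ===== PORT A =====
-- the for-loop with `started` flag and `break`, as structural recursion over the lines
def extractLoopA : List String → List String → Bool → List String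
  | [], block, _ => block
  | line :: rest, block, started =>
    if PySem.Str.strip line ≠ "" then
      extractLoopA rest (block ++ [PySem.Str.rstrip line]) true
    else if started then block
    else extractLoopA rest block started

def extract_latest_changelog_entry (changelog_text : String) : String :=
  let lines := PySem.Str.splitlines changelog_text
  PySem.Str.strip (PySem.Str.join "\n" (extractLoopA lines [] false))

-- ===== PORT B =====
-- itertools.groupby with key = blankness: maximal runs of lines with equal key, in order
def pyGroupByKey (f : String → Bool) : List String → List (Bool × List String)
  | [] => []
  | x :: xs =>
    match pyGroupByKey f xs with
    | [] => [(f x, [x])]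
    | (k, g) :: rest => if f x == k then (f x, x :: g) :: rest else (f x, [x]) :: (k, g) :: rest

-- the for-loop over the groups: the first run keyed True ([] if none; Python then returns "",
-- which equals formatting the empty run)
def firstTrueRun : List (Bool × List String) → List String
  | [] => []
  | (true, g) :: _ => g
  | (false, _) :: t => firstTrueRun t

def extract_latest_changelog_entry_alt (changelog_text : String) : String :=
  let lines := PySem.Str.splitlines changelog_text
  let run := firstTrueRun (pyGroupByKey (fun l => PySem.Str.strip l != "") lines)
  PySem.Str.strip (PySem.Str.join "\n" (run.map PySem.Str.rstrip))

-- ===== PRECONDITION & SPEC =====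
def Spec_extract_latest_changelog_entry (changelog_text : String) (out : String) : Prop := out = extract_latest_changelog_entry_alt changelog_text
instance (changelog_text : String) (out : String) : Decidable (Spec_extract_latest_changelog_entry changelog_text out) := by unfold Spec_extract_latest_changelog_entry; infer_instance

-- ===== CLAIM (what is proved, stated in full; the proofs are below) =====
def Claim_equal_extract_latest_changelog_entry : Prop := ∀ (changelog_text : String), Dom_extract_latest_changelog_entry changelog_text → Spec_extract_latest_changelog_entry changelog_text (extract_latest_changelog_entry changelog_text)

-- ===== LEMMAS AND PROOFS =====
theorem extractLoopA_true (ls : List String) (acc : List String) :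
    extractLoopA ls acc true =
      acc ++ (ls.takeWhile (fun l => PySem.Str.strip l != "")).map PySem.Str.rstrip := by
  induction ls generalizing acc with
  | nil => simp [extractLoopA]
  | cons h t ih =>
    by_cases hb : PySem.Str.strip h = ""
    · simp [extractLoopA, hb]
    · simp [extractLoopA, hb, ih]

theorem extractLoopA_false (ls : List String) (acc : List String) :
    extractLoopA ls acc false =
      acc ++ ((ls.dropWhile (fun l => PySem.Str.strip l == "")).takeWhile
        (fun l => PySem.Str.strip l != "")).map PySem.Str.rstrip := by
  induction ls generalizing acc with
  | nil => simp [extractLoopA]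
  | cons h t ih =>
    by_cases hb : PySem.Str.strip h = ""
    · simp [extractLoopA, hb, ih]
    · simp [extractLoopA, hb, extractLoopA_true]

-- the head run of a non-empty groupby is keyed by the first element's key
theorem pyGroupByKey_cons_key (f : String → Bool) (y : String) (ys : List String) :
    ∃ g rest, pyGroupByKey f (y :: ys) = (f y, g) :: rest := by
  unfold pyGroupByKey
  cases pyGroupByKey f ys with
  | nil => exact ⟨[y], [], rfl⟩
  | cons p rest =>
    obtain ⟨k, g⟩ := p
    by_cases h : f y == k
    · exact ⟨y :: g, rest, by simp [h]⟩
    · exact ⟨[y], (k, g) :: rest, by simp [h]⟩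

-- the first True run of the groupby is exactly dropWhile-then-takeWhile
theorem firstTrueRun_groupBy (f : String → Bool) (xs : List String) :
    firstTrueRun (pyGroupByKey f xs) =
      (xs.dropWhile (fun l => !f l)).takeWhile f := by
  induction xs with
  | nil => simp [pyGroupByKey, firstTrueRun]
  | cons x xs ih =>
    unfold pyGroupByKey
    cases hxs : pyGroupByKey f xs with
    | nil =>
      cases xs with
      | nil =>
        cases hfx : f x <;> simp [firstTrueRun, hfx]
      | cons y ys =>
        obtain ⟨g, rest, hg⟩ := pyGroupByKey_cons_key f y ys
        rw [hxs] at hg; cases hg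
    | cons p rest =>
      obtain ⟨k, g⟩ := p
      rw [hxs] at ih
      cases xs with
      | nil => simp [pyGroupByKey] at hxs
      | cons y ys =>
        obtain ⟨g', rest', hg⟩ := pyGroupByKey_cons_key f y ys
        rw [hxs] at hg
        obtain ⟨⟨hk, -⟩, -⟩ : (k = f y ∧ g = g') ∧ rest = rest' := by simpa using hg
        subst hk
        cases hfx : f x <;> cases hfy : f y <;>
          simp_all [firstTrueRun]

-- ===== VERDICT (by name: the statement is the Claim_ definition above) =====
theorem extract_latest_changelog_entry_spec : Claim_equal_extract_latest_changelog_entry := by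
  intro s _
  unfold Spec_extract_latest_changelog_entry extract_latest_changelog_entry extract_latest_changelog_entry_alt
  simp only []
  rw [extractLoopA_false, firstTrueRun_groupBy]
  have hp : (fun l => !(PySem.Str.strip l != "")) = (fun l => PySem.Str.strip l == "") := by
    funext l; simp [bne]
  rw [hp, List.nil_append]
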